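-- pv_equiv track=rewrite | github.com/0xVector0/MicroBook | examples/orderbook-visualisation.py | aggregate_orders_by_price
-- ===== SOURCE A (Python) =====
-- def aggregate_orders_by_price(orders):
--     """Aggregate orders by price level, summing amounts for same prices"""
--     if not orders:
--         return []
--
--     price_levels = {}
--     for order in orders:
--         amount, price, order_id = order
--         if price in price_levels:
--             price_levels[price] += amount
--         else:
--             price_levels[price] = amount
--
--     # Return as list of (amount, price) tuples, sorted by price
--     return [(amount, price) for price, amount in sorted(price_levels.items())]
-- ===== SOURCE B (Python) =====
-- def aggregate_orders_by_price(orders):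
--     """Aggregate orders by price level, summing amounts for same prices"""
--     if not orders:
--         return []
--     s = sorted(orders, key=lambda o: o[1])
--     result = []
--     cur_price = s[0][1]
--     acc = 0
--     for amount, price, _order_id in s:
--         if price == cur_price:
--             acc += amount
--         else:
--             result.append((acc, cur_price))
--             cur_price = price
--             acc = amount
--     result.append((acc, cur_price))
--     return result
-- ===== Notes on version B (the rewrite author's own statement) =====
-- stated objective: alternative
-- what changed: Replaces the dict accumulation plus sorted(items) with a stable sort by price followed by a single adjacent-grouping pass that keeps a running amount and flushes a group whenever the price changes.
import Mathlib
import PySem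

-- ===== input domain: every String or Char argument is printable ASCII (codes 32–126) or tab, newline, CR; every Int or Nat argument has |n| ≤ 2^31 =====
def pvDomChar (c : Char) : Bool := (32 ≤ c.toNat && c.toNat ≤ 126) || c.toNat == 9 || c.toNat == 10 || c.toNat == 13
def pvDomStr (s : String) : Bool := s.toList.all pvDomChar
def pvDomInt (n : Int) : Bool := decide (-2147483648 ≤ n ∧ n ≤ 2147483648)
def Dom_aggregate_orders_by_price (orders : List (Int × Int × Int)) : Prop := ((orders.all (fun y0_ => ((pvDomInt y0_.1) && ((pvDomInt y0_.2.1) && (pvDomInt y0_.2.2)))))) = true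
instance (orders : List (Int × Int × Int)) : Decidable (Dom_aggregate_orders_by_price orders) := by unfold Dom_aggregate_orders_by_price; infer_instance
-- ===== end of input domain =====

-- B replaces A's dict accumulation + sorted(items) with a stable sort by price and one
-- adjacent-grouping pass (objective: alternative decomposition, same results).

-- ===== PORT A =====
def aggregate_orders_by_price (orders : List (Int × Int × Int)) : List (Int × Int) :=
  if orders = [] then []
  else
    let price_levels : PySem.Dict Int Int :=
      orders.foldl (fun d order =>
        let amount := order.1
        let price := order.2.1
        if d.contains price then d.insert price (d.getD price 0 + amount)
        else d.insert price amount) PySem.Dict.empty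
    (PySem.List.sorted2 price_levels.items (fun pa => pa.1) (fun pa => pa.2) false).map
      (fun pa => (pa.2, pa.1))

-- ===== PORT B =====
-- the 'for amount, price, _order_id in s' loop of Source B; 'result.append((acc, cur_price))'
-- after the loop is the base case
def pvAggLoop : List (Int × Int × Int) → List (Int × Int) → Int → Int → List (Int × Int)
  | [], result, cur_price, acc => result ++ [(acc, cur_price)]
  | o :: rest, result, cur_price, acc =>
    if o.2.1 == cur_price then pvAggLoop rest result cur_price (acc + o.1)
    else pvAggLoop rest (result ++ [(acc, cur_price)]) o.2.1 o.1

def aggregate_orders_by_price_alt (orders : List (Int × Int × Int)) : List (Int × Int) :=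
  if orders = [] then []
  else
    match PySem.List.sorted orders (fun o => o.2.1) false with
    | [] => []  -- unreachable: orders ≠ []
    | o0 :: rest => pvAggLoop (o0 :: rest) [] o0.2.1 0

-- ===== PRECONDITION & SPEC =====
def Spec_aggregate_orders_by_price (orders : List (Int × Int × Int)) (out : List (Int × Int)) : Prop := out = aggregate_orders_by_price_alt orders
instance (orders : List (Int × Int × Int)) (out : List (Int × Int)) : Decidable (Spec_aggregate_orders_by_price orders out) := by unfold Spec_aggregate_orders_by_price; infer_instance

-- ===== CLAIM (what is proved, stated in full; the proofs are below) =====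
def Claim_equal_aggregate_orders_by_price : Prop := ∀ (orders : List (Int × Int × Int)), Dom_aggregate_orders_by_price orders → Spec_aggregate_orders_by_price orders (aggregate_orders_by_price orders)

-- ===== LEMMAS AND PROOFS =====

-- sum of the amounts of the orders at price p
def pvSsum (l : List (Int × Int × Int)) (p : Int) : Int :=
  ((l.filter (fun o => o.2.1 == p)).map (fun o => o.1)).sum

-- the grouping pass of B without the result accumulator
def pvGroups : List (Int × Int × Int) → Int → Int → List (Int × Int)
  | [], cp, acc => [(acc, cp)]
  | o :: rest, cp, acc =>
    if o.2.1 == cp then pvGroups rest cp (acc + o.1)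
    else (acc, cp) :: pvGroups rest o.2.1 o.1

theorem pvAggLoop_eq (s : List (Int × Int × Int)) :
    ∀ (res : List (Int × Int)) (cp acc : Int),
    pvAggLoop s res cp acc = res ++ pvGroups s cp acc := by
  induction s with
  | nil => intro res cp acc; simp [pvAggLoop, pvGroups]
  | cons o rest ih =>
    intro res cp acc
    simp only [pvAggLoop, pvGroups]
    split
    · exact ih res cp (acc + o.1)
    · rw [ih]; simp

theorem pvFoldlAdd_cons (xs : List Int) : ∀ (s : List Int) (x : Int), x ∉ xs →
    List.foldl PySem.Set.add (x :: s) xs = x :: List.foldl PySem.Set.add s xs := by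
  induction xs with
  | nil => intro s x _; rfl
  | cons y ys ih =>
    intro s x hx
    have hyx : ¬ y = x := by
      intro h; exact hx (h ▸ List.mem_cons_self)
    have hys : x ∉ ys := fun h => hx (List.mem_cons_of_mem _ h)
    by_cases hc : y ∈ s
    · have h1 : PySem.Set.add (x :: s) y = x :: s := by
        simp [PySem.Set.add, PySem.Set.contains, hc]
      have h2 : PySem.Set.add s y = s := by simp [PySem.Set.add, PySem.Set.contains, hc]
      simp only [List.foldl_cons, h1, h2, ih _ _ hys]
    · have h1 : PySem.Set.add (x :: s) y = x :: (s ++ [y]) := by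
        simp [PySem.Set.add, PySem.Set.contains, hc, hyx]
      have h2 : PySem.Set.add s y = s ++ [y] := by simp [PySem.Set.add, PySem.Set.contains, hc]
      simp only [List.foldl_cons, h1, h2, ih _ _ hys]

theorem pvOfList_cons (x : Int) (xs : List Int) :
    PySem.Set.ofList (x :: xs) = List.foldl PySem.Set.add [x] xs := rfl

theorem pvOfList_cons_not_mem (x : Int) (xs : List Int) (hx : x ∉ xs) :
    PySem.Set.ofList (x :: xs) = x :: PySem.Set.ofList xs := by
  rw [pvOfList_cons]
  exact pvFoldlAdd_cons xs [] x hx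

theorem pvOfList_cons_cons (x : Int) (xs : List Int) :
    PySem.Set.ofList (x :: x :: xs) = PySem.Set.ofList (x :: xs) := by
  simp [PySem.Set.ofList, PySem.Set.add, PySem.Set.contains]

theorem pvOfList_sublist (xs : List Int) : (PySem.Set.ofList xs).Sublist xs := by
  induction xs using List.reverseRecOn with
  | nil => simp [PySem.Set.ofList]
  | append_singleton ys y ih =>
    have h : PySem.Set.ofList (ys ++ [y]) = PySem.Set.add (PySem.Set.ofList ys) y := by
      simp [PySem.Set.ofList, List.foldl_append]
    rw [h, PySem.Set.add]
    split
    · exact ih.trans (List.sublist_append_left ys [y])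
    · exact List.Sublist.append ih (List.Sublist.refl [y])

theorem pvPairwise_lt_of_le_nodup (l : List Int) (h1 : l.Pairwise (· ≤ ·)) (h2 : l.Nodup) :
    l.Pairwise (· < ·) :=
  (h1.and h2).imp (fun h => lt_of_le_of_ne h.1 h.2)

theorem pvSsum_nil (p : Int) : pvSsum [] p = 0 := rfl

theorem pvSsum_cons (o : Int × Int × Int) (l : List (Int × Int × Int)) (p : Int) :
    pvSsum (o :: l) p = (if o.2.1 = p then o.1 else 0) + pvSsum l p := by
  by_cases h : o.2.1 = p <;> simp [pvSsum, List.filter_cons, h]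

theorem pvSsum_eq_zero (l : List (Int × Int × Int)) (p : Int)
    (h : ∀ o ∈ l, o.2.1 ≠ p) : pvSsum l p = 0 := by
  have : l.filter (fun o => o.2.1 == p) = [] := by
    rw [List.filter_eq_nil_iff]; intro o ho; simpa using h o ho
  simp [pvSsum, this]

theorem pvGroups_spec (s : List (Int × Int × Int)) : ∀ (cp acc : Int),
    (cp :: s.map (fun o => o.2.1)).Pairwise (· ≤ ·) →
    pvGroups s cp acc = (PySem.Set.ofList (cp :: s.map (fun o => o.2.1))).map
      (fun p => ((if p = cp then acc else 0) + pvSsum s p, p)) := by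
  induction s with
  | nil =>
    intro cp acc _
    simp [pvGroups, PySem.Set.ofList, PySem.Set.add, PySem.Set.contains, pvSsum_nil]
  | cons o rest ih =>
    intro cp acc h
    have hcpk : cp ≤ o.2.1 := (List.pairwise_cons.mp h).1 _ (by simp)
    have htail : (o.2.1 :: rest.map (fun o => o.2.1)).Pairwise (· ≤ ·) :=
      (List.pairwise_cons.mp h).2
    by_cases hk : o.2.1 = cp
    · -- same price: merge into the running group
      have hpar : (cp :: rest.map (fun o => o.2.1)).Pairwise (· ≤ ·) := by
        rw [List.pairwise_cons]
        refine ⟨fun b hb => (List.pairwise_cons.mp h).1 b (by simp [hb]), htail.tail⟩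
      have : pvGroups (o :: rest) cp acc = pvGroups rest cp (acc + o.1) := by
        simp [pvGroups, hk]
      rw [this, ih cp (acc + o.1) hpar]
      rw [show ((o :: rest).map (fun o => o.2.1)) = o.2.1 :: rest.map (fun o => o.2.1) from rfl,
        hk, pvOfList_cons_cons]
      apply List.map_congr_left
      intro p _
      by_cases hp : p = cp
      · simp [hp, pvSsum_cons, hk]; ring
      · have hcp : ¬ cp = p := fun e => hp e.symm
        simp [hp, hcp, pvSsum_cons, hk]
    · -- new price: flush the current group
      have hlt : cp < o.2.1 := lt_of_le_of_ne hcpk (fun e => hk e.symm)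
      have hrest : ∀ b ∈ rest.map (fun o => o.2.1), o.2.1 ≤ b :=
        fun b hb => (List.pairwise_cons.mp htail).1 b hb
      have hcplt : ∀ b ∈ (o :: rest).map (fun o => o.2.1), cp < b := by
        intro b hb
        rcases List.mem_cons.mp hb with hb | hb
        · exact hb ▸ hlt
        · exact lt_of_lt_of_le hlt (hrest b hb)
      have hnm : cp ∉ (o :: rest).map (fun o => o.2.1) :=
        fun hm => lt_irrefl cp (hcplt cp hm)
      have : pvGroups (o :: rest) cp acc = (acc, cp) :: pvGroups rest o.2.1 o.1 := by
        simp [pvGroups, hk]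
      rw [this, ih o.2.1 o.1 htail, pvOfList_cons_not_mem cp _ hnm]
      rw [List.map_cons]
      have hz : pvSsum (o :: rest) cp = 0 := by
        apply pvSsum_eq_zero
        intro o' ho'
        have : o'.2.1 ∈ (o :: rest).map (fun o => o.2.1) := List.mem_map_of_mem ho'
        exact fun e => lt_irrefl cp (e ▸ hcplt _ this)
      rw [show ((o :: rest).map (fun o => o.2.1)) = o.2.1 :: rest.map (fun o => o.2.1) from rfl]
      congr 1
      · simp [hz]
      · apply List.map_congr_left
        intro p hp
        have hpmem : p ∈ o.2.1 :: rest.map (fun o => o.2.1) := by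
          have := pvOfList_sublist (o.2.1 :: rest.map (fun o => o.2.1))
          exact this.mem hp
        have hpcp : p ≠ cp := by
          intro e
          exact lt_irrefl cp (hcplt cp (by rw [← e]; simpa using hpmem))
        by_cases hpk : p = o.2.1
        · simp [hpk, pvSsum_cons, hk]
        · have hkp : ¬ o.2.1 = p := fun e => hpk e.symm
          simp [hpcp, hpk, hkp, pvSsum_cons]

-- ===== A-side lemmas =====

theorem pvGetD_fold (l : List (Int × Int × Int)) : ∀ (d : PySem.Dict Int Int) (p : Int),
    (l.foldl (fun d o => d.insert o.2.1 (d.getD o.2.1 0 + o.1)) d).getD p 0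
      = d.getD p 0 + pvSsum l p := by
  induction l with
  | nil => intro d p; simp [pvSsum_nil]
  | cons o rest ih =>
    intro d p
    simp only [List.foldl_cons]
    rw [ih, PySem.Dict.getD_insert, pvSsum_cons]
    by_cases hp : p = o.2.1
    · simp [hp]; ring
    · have : ¬ o.2.1 = p := fun e => hp e.symm
      simp [hp, this]

theorem pvInsertBy_congr {α : Type} (b1 b2 : α → α → Bool) (x : α) (ys : List α)
    (h : ∀ y ∈ ys, b1 x y = b2 x y) :
    PySem.List.insertBy b1 x ys = PySem.List.insertBy b2 x ys := by
  induction ys with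
  | nil => rfl
  | cons y ys ih =>
    simp only [PySem.List.insertBy]
    rw [h y (by simp)]
    split
    · rfl
    · rw [ih (fun y' hy' => h y' (List.mem_cons_of_mem _ hy'))]

theorem pvFoldl_insertBy_congr {α : Type} (xs : List α) : ∀ (acc : List α) (b1 b2 : α → α → Bool),
    (∀ a b : α, (a ∈ xs ∨ a ∈ acc) → (b ∈ xs ∨ b ∈ acc) → b1 a b = b2 a b) →
    xs.foldl (fun acc x => PySem.List.insertBy b1 x acc) acc
      = xs.foldl (fun acc x => PySem.List.insertBy b2 x acc) acc := by
  induction xs with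
  | nil => intro acc b1 b2 _; rfl
  | cons x xs ih =>
    intro acc b1 b2 h
    simp only [List.foldl_cons]
    have h1 : PySem.List.insertBy b1 x acc = PySem.List.insertBy b2 x acc :=
      pvInsertBy_congr b1 b2 x acc (fun y hy => h x y (Or.inl (by simp)) (Or.inr hy))
    rw [h1]
    apply ih
    intro a b ha hb
    apply h a b
    · rcases ha with ha | ha
      · exact Or.inl (List.mem_cons_of_mem _ ha)
      · rcases (PySem.List.mem_insertBy _ _ _ _).mp ha with e | ha'
        · exact Or.inl (e ▸ by simp)
        · exact Or.inr ha'
    · rcases hb with hb | hb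
      · exact Or.inl (List.mem_cons_of_mem _ hb)
      · rcases (PySem.List.mem_insertBy _ _ _ _).mp hb with e | hb'
        · exact Or.inl (e ▸ by simp)
        · exact Or.inr hb'

-- sorted2 over a list of pairs with pairwise-distinct first components sorts by the first component
theorem pvSorted2_eq_sorted_fst (xs : List (Int × Int))
    (h : ∀ a ∈ xs, ∀ b ∈ xs, a.1 = b.1 → a = b) :
    PySem.List.sorted2 xs (fun pa => pa.1) (fun pa => pa.2) false
      = PySem.List.sorted xs (fun pa => pa.1) false := by
  rw [PySem.List.sorted_eq_foldl_insertBy]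
  show xs.foldl (fun acc x => PySem.List.insertBy _ x acc) [] = _
  apply pvFoldl_insertBy_congr
  intro a b ha hb
  simp only [List.not_mem_nil, or_false] at ha hb
  by_cases he : a.1 = b.1
  · have : a = b := h a ha b hb he
    subst this
    simp
  · rcases lt_or_gt_of_ne he with hlt | hgt
    · simp [hlt]
    · simp [hgt, not_lt_of_gt hgt]

-- ===== the common normal form =====

theorem pvAlt_eq (orders : List (Int × Int × Int)) (hne : orders ≠ []) :
    aggregate_orders_by_price_alt orders
      = (PySem.Set.ofList ((PySem.List.sorted orders (fun o => o.2.1) false).map (fun o => o.2.1))).map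
          (fun p => (pvSsum orders p, p)) := by
  have hsne : PySem.List.sorted orders (fun o => o.2.1) false ≠ [] := by
    rw [Ne, PySem.List.sorted_eq_nil_iff]; exact hne
  rcases hs : PySem.List.sorted orders (fun o => o.2.1) false with _ | ⟨o0, t⟩
  · exact absurd hs hsne
  · have halt : aggregate_orders_by_price_alt orders = pvAggLoop (o0 :: t) [] o0.2.1 0 := by
      unfold aggregate_orders_by_price_alt
      rw [if_neg hne, hs]
    have hpw : ((o0 :: t).map (fun o => o.2.1)).Pairwise (· ≤ ·) := by
      rw [← hs]
      exact List.pairwise_map.mpr (PySem.List.sorted_pairwise orders (fun o => o.2.1))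
    have hpw2 : (o0.2.1 :: (o0 :: t).map (fun o => o.2.1)).Pairwise (· ≤ ·) := by
      rw [List.pairwise_cons]
      constructor
      · intro b hb
        rcases List.mem_cons.mp hb with e | hb'
        · exact le_of_eq e.symm
        · exact (List.pairwise_cons.mp hpw).1 b hb'
      · exact hpw
    rw [halt, pvAggLoop_eq, List.nil_append, pvGroups_spec (o0 :: t) o0.2.1 0 hpw2]
    rw [show ((o0 :: t).map (fun o => o.2.1)) = o0.2.1 :: t.map (fun o => o.2.1) from rfl,
      pvOfList_cons_cons]
    have hperm : (PySem.List.sorted orders (fun o => o.2.1) false).Perm orders :=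
      PySem.List.sorted_perm orders (fun o => o.2.1) false
    rw [hs] at hperm
    apply List.map_congr_left
    intro p _
    have hfp : ((o0 :: t).filter (fun o => o.2.1 == p)).Perm
        (orders.filter (fun o => o.2.1 == p)) := hperm.filter _
    have : pvSsum (o0 :: t) p = pvSsum orders p := by
      unfold pvSsum
      exact List.Perm.sum_eq (hfp.map _)
    simp [this]

theorem pvA_eq (orders : List (Int × Int × Int)) (hne : orders ≠ []) :
    aggregate_orders_by_price orders
      = (PySem.List.sorted (PySem.Set.ofList (orders.map (fun o => o.2.1))) (fun p => p) false).map
          (fun p => (pvSsum orders p, p)) := by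
  unfold aggregate_orders_by_price
  rw [if_neg hne]
  -- the accumulation loop, with both branches written as one insert
  have hstep : orders.foldl (fun d order =>
        let amount := order.1
        let price := order.2.1
        if d.contains price then d.insert price (d.getD price 0 + amount)
        else d.insert price amount) PySem.Dict.empty
      = orders.foldl (fun d o => d.insert o.2.1 (d.getD o.2.1 0 + o.1)) PySem.Dict.empty := by
    apply PySem.List.foldl_congr_mem
    intro d o _
    by_cases hc : d.contains o.2.1 = true
    · simp [hc]
    · simp only [Bool.not_eq_true] at hc
      simp [hc, PySem.Dict.getD_of_not_contains d 0 hc]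
  set d := orders.foldl (fun d o => d.insert o.2.1 (d.getD o.2.1 0 + o.1)) PySem.Dict.empty with hd
  have hkeys : d.keys = PySem.Set.ofList (orders.map (fun o => o.2.1)) := by
    rw [hd, PySem.Dict.keys_foldl_insert_key orders (fun o => o.2.1)
      (fun d o => d.getD o.2.1 0 + o.1) PySem.Dict.empty]
    rfl
  have hnodup : d.keys.Nodup := by
    rw [hkeys]; exact PySem.Set.nodup_ofList _
  have hget : ∀ p : Int, d.getD p 0 = pvSsum orders p := by
    intro p; rw [hd, pvGetD_fold]; simp
  have hitems : d.items = (PySem.Set.ofList (orders.map (fun o => o.2.1))).map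
      (fun k => (k, pvSsum orders k)) := by
    rw [PySem.Dict.items_eq_map_keys d hnodup 0, hkeys]
    exact List.map_congr_left (fun k _ => by rw [hget k])
  rw [hstep]
  show (PySem.List.sorted2 d.items (fun pa => pa.1) (fun pa => pa.2) false).map
      (fun pa => (pa.2, pa.1)) = _
  rw [hitems]
  have hdistinct : ∀ a ∈ (PySem.Set.ofList (orders.map (fun o => o.2.1))).map
        (fun k => (k, pvSsum orders k)),
      ∀ b ∈ (PySem.Set.ofList (orders.map (fun o => o.2.1))).map
        (fun k => (k, pvSsum orders k)), a.1 = b.1 → a = b := by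
    intro a ha b hb he
    rcases List.mem_map.mp ha with ⟨ka, _, rfl⟩
    rcases List.mem_map.mp hb with ⟨kb, _, rfl⟩
    simp only at he
    rw [he]
  rw [pvSorted2_eq_sorted_fst _ hdistinct]
  -- the sort of the (k, sum) pairs by first component is the sort of the keys, mapped
  have hKnd : (PySem.Set.ofList (orders.map (fun o => o.2.1))).Nodup := PySem.Set.nodup_ofList _
  set KS := PySem.List.sorted (PySem.Set.ofList (orders.map (fun o => o.2.1))) (fun p => p) false
    with hKS
  have hKSperm : KS.Perm (PySem.Set.ofList (orders.map (fun o => o.2.1))) :=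
    PySem.List.sorted_perm _ _ false
  have hKSnd : KS.Nodup := hKSperm.nodup_iff.mpr hKnd
  have hKSlt : KS.Pairwise (· < ·) :=
    pvPairwise_lt_of_le_nodup KS (PySem.List.sorted_pairwise _ _) hKSnd
  have hsorted : PySem.List.sorted ((PySem.Set.ofList (orders.map (fun o => o.2.1))).map
        (fun k => (k, pvSsum orders k))) (fun pa => pa.1) false
      = KS.map (fun k => (k, pvSsum orders k)) := by
    apply PySem.List.sorted_eq_of_perm_of_pairwise_lt
    · exact hKSperm.map _
    · exact List.pairwise_map.mpr hKSlt
  rw [hsorted, List.map_map]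
  rfl

-- B's key set (over the sorted list) sorts to A's sorted key list
theorem pvKeys_eq (orders : List (Int × Int × Int)) :
    PySem.List.sorted (PySem.Set.ofList (orders.map (fun o => o.2.1))) (fun p => p) false
      = PySem.Set.ofList ((PySem.List.sorted orders (fun o => o.2.1) false).map (fun o => o.2.1)) := by
  apply PySem.List.sorted_eq_of_perm_of_pairwise_lt
  · apply (List.perm_ext_iff_of_nodup (PySem.Set.nodup_ofList _) (PySem.Set.nodup_ofList _)).mpr
    intro a
    rw [PySem.Set.mem_ofList, PySem.Set.mem_ofList]
    exact ((PySem.List.sorted_perm orders (fun o => o.2.1) false).map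
      (fun o => o.2.1)).mem_iff
  · have h1 : (((PySem.List.sorted orders (fun o => o.2.1) false).map
        (fun o => o.2.1))).Pairwise (· ≤ ·) :=
      List.pairwise_map.mpr (PySem.List.sorted_pairwise orders (fun o => o.2.1))
    exact pvPairwise_lt_of_le_nodup _ (h1.sublist (pvOfList_sublist _)) (PySem.Set.nodup_ofList _)

-- ===== VERDICT (by name: the statement is the Claim_ definition above) =====
theorem aggregate_orders_by_price_spec : Claim_equal_aggregate_orders_by_price := by
  intro orders _
  unfold Spec_aggregate_orders_by_price
  by_cases hne : orders = []
  · subst hne; rfl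
  · rw [pvA_eq orders hne, pvAlt_eq orders hne, pvKeys_eq orders]
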